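-- pv_equiv track=rewrite | github.com/mcfalli/TickSTockAppV2 | scripts/dev_tools/extract_documentation.py | _adjust_heading_levels
-- ===== SOURCE A (Python) =====
-- def _adjust_heading_levels(content):
--     """Adjust heading levels to prevent TOC conflicts."""
--     lines = content.split('\n')
--     adjusted_lines = []
--
--     for line in lines:
--         if line.startswith('#'):
--             # Count the number of # symbols
--             level = len(line) - len(line.lstrip('#'))
--             if level == 1:
--                 # Convert # to ##
--                 line = '#' + line
--             adjusted_lines.append(line)
--         else:
--             adjusted_lines.append(line)
--
--     return '\n'.join(adjusted_lines)
-- ===== SOURCE B (Python) =====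
-- import re
--
-- def _adjust_heading_levels(content):
--     """Adjust heading levels to prevent TOC conflicts."""
--     # One multiline regex substitution: at each line start, a single '#'
--     # (not followed by another '#') gets promoted to '##'.
--     return re.sub(r'^#(?!#)', '##', content, flags=re.MULTILINE)
-- ===== Notes on version B (the rewrite author's own statement) =====
-- stated objective: idiomatic
-- what changed: Replaces A's split-into-lines / per-line '#'-counting loop / rejoin pipeline with a single multiline regex substitution re.sub(r'^#(?!#)', '##', content, flags=re.MULTILINE), ported as one left-to-right character scan tracking line starts.
import Mathlib
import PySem

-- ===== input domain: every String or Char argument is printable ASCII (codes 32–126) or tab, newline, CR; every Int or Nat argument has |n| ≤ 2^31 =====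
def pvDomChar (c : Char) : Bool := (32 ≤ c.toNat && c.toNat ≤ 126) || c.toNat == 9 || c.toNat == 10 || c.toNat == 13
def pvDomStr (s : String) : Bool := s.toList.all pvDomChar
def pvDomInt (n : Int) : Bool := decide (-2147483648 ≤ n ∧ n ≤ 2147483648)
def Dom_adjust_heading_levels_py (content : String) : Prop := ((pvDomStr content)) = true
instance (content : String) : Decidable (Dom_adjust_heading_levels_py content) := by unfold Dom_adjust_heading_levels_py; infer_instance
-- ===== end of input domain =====

-- B replaces A's split/scan/join over a line list by one multiline regex substitution
-- (ported as a single left-to-right character scan); objective: idiomatic/alternative.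

-- ===== PORT A =====
-- per-line body of A's for-loop; line.lstrip('#') is ported by hand as
-- dropWhile (· == '#') — exact: Python lstrip(chars) drops exactly the leading
-- characters drawn from the set {'#'}
def adjLineA (line : List Char) : List Char :=
  if PySem.Chars.startswith line ['#'] then
    let level := PySem.Chars.len line - PySem.Chars.len (line.dropWhile (· == '#'))
    if level = 1 then '#' :: line else line
  else line

def adjust_heading_levels_py (content : String) : String :=
  let lines := PySem.Chars.splitOn content.toList ['\n']
  String.mk (PySem.Chars.join ['\n'] (lines.map adjLineA))

-- ===== PORT B =====
-- transliteration of re.sub(r'^#(?!#)', '##', content, flags=re.MULTILINE):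
-- the Bool is "at a MULTILINE line start"; there a '#' whose lookahead (?!#)
-- succeeds (next char absent or ≠ '#') is replaced by '##'; everything else is copied.
def scanB : Bool → List Char → List Char
  | _, [] => []
  | atStart, c :: rest =>
    if atStart && c == '#' && !(rest.head? == some '#') then
      '#' :: c :: scanB false rest
    else
      c :: scanB (c == '\n') rest

def adjust_heading_levels_py_alt (content : String) : String :=
  String.mk (scanB true content.toList)

-- ===== PRECONDITION & SPEC =====
def Spec_adjust_heading_levels_py (content : String) (out : String) : Prop := out = adjust_heading_levels_py_alt content
instance (content : String) (out : String) : Decidable (Spec_adjust_heading_levels_py content out) := by unfold Spec_adjust_heading_levels_py; infer_instance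

-- ===== CLAIM (what is proved, stated in full; the proofs are below) =====
def Claim_equal_adjust_heading_levels_py : Prop := ∀ (content : String), Dom_adjust_heading_levels_py content → Spec_adjust_heading_levels_py content (adjust_heading_levels_py content)

-- ===== LEMMAS AND PROOFS =====

-- structural split on '\n' (proof-only reference shape)
def splitNl : List Char → List (List Char)
  | [] => [[]]
  | c :: r =>
    if c = '\n' then [] :: splitNl r
    else
      match splitNl r with
      | [] => [[c]]
      | h :: t => (c :: h) :: t

-- simplified per-line function (proof-only)
def adjLine' : List Char → List Char
  | '#' :: t => if t.head? = some '#' then '#' :: t else '#' :: '#' :: t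
  | l => l

lemma splitNl_ne_nil (cs : List Char) : splitNl cs ≠ [] := by
  cases cs with
  | nil => simp [splitNl]
  | cons c r =>
    simp only [splitNl]
    split
    · simp
    · split <;> simp_all

lemma adjLineA_eq (line : List Char) : adjLineA line = adjLine' line := by
  cases line with
  | nil => simp [adjLineA, adjLine', PySem.Chars.startswith_iff]
  | cons c t =>
    by_cases hc : c = '#'
    · subst hc
      have hsw : PySem.Chars.startswith ('#' :: t) ['#'] = true := by
        rw [PySem.Chars.startswith_iff]; simp
      simp only [adjLineA, hsw, if_true]
      cases t with
      | nil => simp [adjLine', List.dropWhile, PySem.Chars.len]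
      | cons d t' =>
        by_cases hdh : d = '#'
        · subst hdh
          have h1 : (('#' : Char) :: '#' :: t').dropWhile (· == '#') = t'.dropWhile (· == '#') := by
            simp [List.dropWhile]
          have hle := List.length_dropWhile_le (p := (· == '#')) t'
          simp only [h1, PySem.Chars.len_eq, adjLine', List.head?_cons, List.length_cons]
          rw [if_neg (by push_cast; omega)]
          simp
        · have hdb : (d == '#') = false := by simp [hdh]
          have h1 : (('#' : Char) :: d :: t').dropWhile (· == '#') = d :: t' := by
            simp [List.dropWhile, hdb]
          simp only [h1, PySem.Chars.len_eq, adjLine', List.head?_cons, List.length_cons]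
          rw [if_pos (by push_cast; omega)]
          simp [hdh]
    · have hsw : PySem.Chars.startswith (c :: t) ['#'] = false := by
        rw [Bool.eq_false_iff, Ne, PySem.Chars.startswith_iff, List.cons_prefix_cons]
        intro h; exact hc h.1.symm
      have h' : adjLine' (c :: t) = c :: t := by
        cases t <;> simp [adjLine', hc]
      simp [adjLineA, hsw, h']

lemma go_eq (fuel : Nat) : ∀ (l cur : List Char) (acc : List (List Char)),
    l.length ≤ fuel →
    PySem.Chars.splitOn.go ['\n'] fuel l cur acc
      = acc.reverse ++ (splitNl l).modifyHead (cur.reverse ++ ·) := by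
  induction fuel with
  | zero =>
    intro l cur acc h
    have hl : l = [] := by cases l <;> simp_all
    subst hl
    simp [PySem.Chars.splitOn.go, splitNl]
  | succ n ih =>
    intro l cur acc h
    cases l with
    | nil => simp [PySem.Chars.splitOn.go, splitNl]
    | cons c rest =>
      rcases hx : splitNl rest with _ | ⟨hh, tt⟩
      · exact absurd hx (splitNl_ne_nil rest)
      by_cases hc : c = '\n'
      · subst hc
        have hpre : List.isPrefixOf ['\n'] ('\n' :: rest) = true := by
          simp [List.isPrefixOf]
        simp only [PySem.Chars.splitOn.go, hpre, if_true, List.length_singleton,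
          List.drop_one, List.tail_cons]
        rw [ih rest [] (cur.reverse :: acc) (by simpa using Nat.le_of_succ_le_succ h)]
        have hs : splitNl ('\n' :: rest) = [] :: splitNl rest := by simp [splitNl]
        rw [hs, hx]
        simp [List.modifyHead]
      · have hpre : List.isPrefixOf ['\n'] (c :: rest) = false := by
          simp [List.isPrefixOf]
          exact fun hne => absurd hne.symm hc
        simp only [PySem.Chars.splitOn.go, hpre, if_false, Bool.false_eq_true]
        rw [ih rest (c :: cur) acc (by simpa using Nat.le_of_succ_le_succ h)]
        have hs : splitNl (c :: rest) = (c :: hh) :: tt := by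
          simp only [splitNl, if_neg hc, hx]
        rw [hs, hx]
        simp [List.modifyHead]

lemma splitOn_nl (cs : List Char) : PySem.Chars.splitOn cs ['\n'] = splitNl cs := by
  have h := go_eq (cs.length + 1) cs [] [] (by omega)
  rcases hx : splitNl cs with _ | ⟨hh, tt⟩
  · exact absurd hx (splitNl_ne_nil cs)
  rw [hx] at h
  simpa [PySem.Chars.splitOn, List.modifyHead] using h

lemma head_splitNl (r : List Char) (h : List Char) (t : List (List Char))
    (hs : splitNl r = h :: t) : (h.head? = some '#') ↔ (r.head? = some '#') := by
  cases r with
  | nil =>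
    simp [splitNl] at hs
    rw [hs.1]
  | cons c r' =>
    by_cases hc : c = '\n'
    · subst hc
      simp [splitNl] at hs
      rw [hs.1]
      simp
    · simp only [splitNl, if_neg hc] at hs
      rcases hx : splitNl r' with _ | ⟨h', t'⟩
      · exact absurd hx (splitNl_ne_nil r')
      · rw [hx] at hs
        cases hs
        simp

lemma join_cons (a : List Char) (b : List Char) (l : List (List Char)) :
    PySem.Chars.join ['\n'] (a :: b :: l) = a ++ '\n' :: PySem.Chars.join ['\n'] (b :: l) := by
  simpa using PySem.Chars.join_cons_cons a b l (sep := ['\n'])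

lemma scanB_eq (cs : List Char) :
    (scanB true cs = PySem.Chars.join ['\n'] ((splitNl cs).map adjLine'))
    ∧ (∀ h t, splitNl cs = h :: t →
        scanB false cs = PySem.Chars.join ['\n'] (h :: (t.map adjLine'))) := by
  induction cs with
  | nil =>
    constructor
    · simp [scanB, splitNl, adjLine', PySem.Chars.join_singleton]
    · intro h t hs
      simp [splitNl] at hs
      simp [scanB, hs.1, hs.2, PySem.Chars.join_singleton]
  | cons c r ih =>
    rcases hx : splitNl r with _ | ⟨h, t⟩
    · exact absurd hx (splitNl_ne_nil r)
    have ihT := ih.1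
    have ihF := ih.2 h t hx
    by_cases hc : c = '\n'
    · subst hc
      have hs : splitNl ('\n' :: r) = [] :: splitNl r := by simp [splitNl]
      have hg : (true && ('\n' == '#') && !(r.head? == some '#')) = false := by simp
      constructor
      · rw [hs, List.map_cons, hx, List.map_cons, join_cons]
        simp only [scanB, hg, Bool.false_eq_true, if_false]
        simp [adjLine', ihT, hx]
      · intro h' t' hs'
        rw [hs] at hs'
        cases hs'
        rw [hx, List.map_cons, join_cons]
        simp only [scanB]
        simp [ihT, hx]
    · have hcb : (c == '\n') = false := by simp [hc]
      have hs : splitNl (c :: r) = (c :: h) :: t := by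
        simp only [splitNl, if_neg hc, hx]
      constructor
      · rw [hs, List.map_cons]
        by_cases hch : c = '#'
        · subst hch
          by_cases hr : r.head? = some '#'
          · have hh : h.head? = some '#' := (head_splitNl r h t hx).mpr hr
            have hguard : (true && ('#' == '#') && !(r.head? == some '#')) = false := by
              simp [hr]
            simp only [scanB, hguard, Bool.false_eq_true, if_false]
            have : adjLine' ('#' :: h) = '#' :: h := by simp [adjLine', hh]
            rw [this]
            rcases t with _ | ⟨b, t'⟩
            · simp only [List.map_nil, PySem.Chars.join_singleton] at ihF ⊢
              simp [ihF, hcb]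
            · rw [List.map_cons, join_cons] at ihF ⊢
              simp [ihF, hcb]
          · have hh : h.head? ≠ some '#' := fun hx' => hr ((head_splitNl r h t hx).mp hx')
            have hguard : (true && ('#' == '#') && !(r.head? == some '#')) = true := by
              simp [hr]
            simp only [scanB, hguard, if_true]
            have : adjLine' ('#' :: h) = '#' :: '#' :: h := by simp [adjLine', hh]
            rw [this]
            rcases t with _ | ⟨b, t'⟩
            · simp only [List.map_nil, PySem.Chars.join_singleton] at ihF ⊢
              simp [ihF]
            · rw [List.map_cons, join_cons] at ihF ⊢
              simp [ihF]
        · have : adjLine' (c :: h) = c :: h := by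
            cases h <;> simp [adjLine', hch]
          rw [this]
          have hguard : (true && (c == '#') && !(r.head? == some '#')) = false := by
            simp [hch]
          simp only [scanB, hguard, Bool.false_eq_true, if_false]
          rcases t with _ | ⟨b, t'⟩
          · simp only [List.map_nil, PySem.Chars.join_singleton] at ihF ⊢
            simp [ihF, hcb]
          · rw [List.map_cons, join_cons] at ihF ⊢
            simp [ihF, hcb]
      · intro h' t' hs'
        rw [hs] at hs'
        cases hs'
        have hguard : (false && (c == '#') && !(r.head? == some '#')) = false := by
          simp
        simp only [scanB, hguard, Bool.false_eq_true, if_false]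
        rcases t with _ | ⟨b, t''⟩
        · simp only [List.map_nil, PySem.Chars.join_singleton] at ihF ⊢
          simp [ihF, hcb]
        · rw [List.map_cons, join_cons] at ihF ⊢
          simp [ihF, hcb]

-- ===== VERDICT (by name: the statement is the Claim_ definition above) =====
theorem adjust_heading_levels_py_spec : Claim_equal_adjust_heading_levels_py := by
  intro content _
  show adjust_heading_levels_py content = adjust_heading_levels_py_alt content
  unfold adjust_heading_levels_py adjust_heading_levels_py_alt
  rw [splitOn_nl, (scanB_eq content.toList).1]
  have hmap : List.map adjLineA (splitNl content.toList)
      = List.map adjLine' (splitNl content.toList) :=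
    List.map_congr_left (fun l _ => adjLineA_eq l)
  show String.mk (PySem.Chars.join ['\n'] (List.map adjLineA (splitNl content.toList)))
      = String.mk (PySem.Chars.join ['\n'] (List.map adjLine' (splitNl content.toList)))
  rw [hmap]
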